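-- pv_equiv track=rewrite | github.com/GjorgiNechovski/advent-of-code-2024 | Day14_Python/2.py | countConnections
-- ===== SOURCE A (Python) =====
-- def countConnections(positions, width, height):
--     connections = 0
--     posSet = set(positions)
--     for y in range(height):
--         for x in range(width - 1):
--             if (x, y) in posSet and (x + 1, y) in posSet:
--                 connections += 1
--     return connections
-- ===== SOURCE B (Python) =====
-- def countConnections(positions, width, height):
--     posSet = set(positions)
--     return sum(
--         1
--         for (x, y) in posSet
--         if 0 <= y < height and 0 <= x < width - 1 and (x + 1, y) in posSet
--     )
-- ===== Notes on version B (the rewrite author's own statement) =====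
-- stated objective: faster
-- what changed: Replaces A's double loop over every grid cell (x,y) with a single pass over the deduplicated positions, counting each in-bounds position whose right neighbour is also in the set.
import Mathlib
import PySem

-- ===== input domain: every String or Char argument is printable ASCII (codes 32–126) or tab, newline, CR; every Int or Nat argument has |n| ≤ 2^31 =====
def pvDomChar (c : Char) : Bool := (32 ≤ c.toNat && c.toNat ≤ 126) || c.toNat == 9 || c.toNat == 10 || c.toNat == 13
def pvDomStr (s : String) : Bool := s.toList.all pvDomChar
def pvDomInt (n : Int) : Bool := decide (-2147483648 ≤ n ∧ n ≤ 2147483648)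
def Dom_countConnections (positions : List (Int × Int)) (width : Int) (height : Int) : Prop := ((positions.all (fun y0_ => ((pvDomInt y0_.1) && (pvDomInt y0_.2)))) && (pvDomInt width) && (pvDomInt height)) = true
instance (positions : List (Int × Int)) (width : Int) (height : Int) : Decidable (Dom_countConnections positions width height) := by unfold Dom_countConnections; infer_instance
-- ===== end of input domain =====

-- B replaces A's full width×height grid scan by a single pass over the deduplicated
-- positions, counting each in-bounds position whose right neighbour is also present.

-- ===== PORT A =====
def countConnections (positions : List (Int × Int)) (width : Int) (height : Int) : Int :=
  let posSet : PySem.Set (Int × Int) := PySem.Set.ofList positions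
  (PySem.List.pyRange 0 height 1).foldl (fun connections y =>
    (PySem.List.pyRange 0 (width - 1) 1).foldl (fun connections x =>
      if PySem.Set.contains posSet (x, y) ∧ PySem.Set.contains posSet (x + 1, y) then
        connections + 1
      else connections) connections) 0

-- ===== PORT B =====
-- sum(1 for (x,y) in posSet if …): ported as a 0/1 sum over the set's elements;
-- the summed value is independent of the set's iteration order.
def countConnections_alt (positions : List (Int × Int)) (width : Int) (height : Int) : Int :=
  let posSet : PySem.Set (Int × Int) := PySem.Set.ofList positions
  (posSet.map (fun p =>
    if 0 ≤ p.2 ∧ p.2 < height ∧ 0 ≤ p.1 ∧ p.1 < width - 1 ∧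
        PySem.Set.contains posSet (p.1 + 1, p.2) then (1 : Int) else 0)).sum

-- ===== PRECONDITION & SPEC =====
def Spec_countConnections (positions : List (Int × Int)) (width : Int) (height : Int) (out : Int) : Prop := out = countConnections_alt positions width height
instance (positions : List (Int × Int)) (width : Int) (height : Int) (out : Int) : Decidable (Spec_countConnections positions width height out) := by unfold Spec_countConnections; infer_instance

-- ===== CLAIM (what is proved, stated in full; the proofs are below) =====
def Claim_equal_countConnections : Prop := ∀ (positions : List (Int × Int)) (width : Int) (height : Int), Dom_countConnections positions width height → Spec_countConnections positions width height (countConnections positions width height)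

-- ===== LEMMAS AND PROOFS =====

theorem sum_map_ite_prop {α : Type} (p : α → Prop) [DecidablePred p] (l : List α) :
    (l.map (fun x => if p x then (1 : Int) else 0)).sum
      = (l.countP (fun x => decide (p x)) : Int) := by
  induction l with
  | nil => simp
  | cons a t ih => by_cases h : p a <;> simp [h, ih, add_comm]

theorem sum_map_natCast (l : List Int) (f : Int → Nat) :
    (l.map (fun y => (f y : Int))).sum = ((l.map f).sum : Int) := by
  induction l with
  | nil => simp
  | cons a t ih => simp [ih]

theorem core_nat (S : List (Int × Int)) (hS : S.Nodup) (w h : Int) :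
    ((PySem.List.pyRange 0 h).map (fun y =>
      (PySem.List.pyRange 0 (w - 1)).countP
        (fun x => decide ((x, y) ∈ S ∧ (x + 1, y) ∈ S)))).sum
    = S.countP (fun p => decide (0 ≤ p.2 ∧ p.2 < h ∧ 0 ≤ p.1 ∧ p.1 < w - 1 ∧
        (p.1 + 1, p.2) ∈ S)) := by
  classical
  have hfin : ∀ (l : List Int) (hl : l.Nodup) (q : Int → Prop) [DecidablePred q],
      l.countP (fun x => decide (q x)) = (l.toFinset.filter q).card := by
    intro l hl q _
    rw [List.countP_eq_length_filter,
      ← List.toFinset_card_of_nodup (hl.filter _), List.toFinset_filter]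
    congr 1
    simp
  have hfinS : ∀ (q : Int × Int → Prop) [DecidablePred q],
      S.countP (fun x => decide (q x)) = (S.toFinset.filter q).card := by
    intro q _
    rw [List.countP_eq_length_filter,
      ← List.toFinset_card_of_nodup (hS.filter _), List.toFinset_filter]
    congr 1
    simp
  rw [hfinS]
  have h1 : ∀ y : Int, (PySem.List.pyRange 0 (w - 1)).countP
      (fun x => decide ((x, y) ∈ S ∧ (x + 1, y) ∈ S))
      = ((PySem.List.pyRange 0 (w - 1)).toFinset.filter
          (fun x => (x, y) ∈ S ∧ (x + 1, y) ∈ S)).card := fun y =>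
    hfin _ (PySem.List.nodup_pyRange_one _ _) _
  simp only [h1]
  rw [← List.sum_toFinset _ (PySem.List.nodup_pyRange_one 0 h)]
  simp only [Finset.card_filter]
  have hp := Finset.sum_product_right ((PySem.List.pyRange 0 (w - 1)).toFinset)
    ((PySem.List.pyRange 0 h).toFinset)
    (fun p : Int × Int => if (p.1, p.2) ∈ S ∧ (p.1 + 1, p.2) ∈ S then (1 : Nat) else 0)
  simp only at hp
  rw [← hp, ← Finset.card_filter, ← Finset.card_filter]
  congr 1
  apply Finset.ext
  intro p
  simp only [Finset.mem_filter, Finset.mem_product, List.mem_toFinset,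
    PySem.List.mem_pyRange_one, Prod.mk.eta]
  tauto

theorem countConnections_core (S : List (Int × Int)) (hS : S.Nodup) (w h : Int) :
    ((PySem.List.pyRange 0 h).map (fun y =>
      ((PySem.List.pyRange 0 (w - 1)).countP
        (fun x => decide ((x, y) ∈ S ∧ (x + 1, y) ∈ S)) : Int))).sum
    = (S.countP (fun p => decide (0 ≤ p.2 ∧ p.2 < h ∧ 0 ≤ p.1 ∧ p.1 < w - 1 ∧
        (p.1 + 1, p.2) ∈ S)) : Int) := by
  rw [sum_map_natCast, core_nat S hS w h]

-- ===== VERDICT (by name: the statement is the Claim_ definition above) =====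
theorem countConnections_spec : Claim_equal_countConnections := by
  intro positions width height _
  unfold Spec_countConnections countConnections countConnections_alt
  simp only [PySem.List.foldl_ite_add_one, PySem.List.foldl_add, zero_add,
    sum_map_ite_prop, PySem.Set.contains_iff]
  exact countConnections_core _ (PySem.Set.nodup_ofList positions) width height
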